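-- pv_equiv track=rewrite | github.com/vackuzn/adventofcode2023 | d7/solution.py | get_card_to_add
-- ===== SOURCE A (Python) =====
-- from collections import Counter
--
-- def get_card_to_add(cards: str) -> str:
--     best_card = ''
--     card_count = 0
--
--     for card, count in Counter(cards).items():
--         if count == card_count:
--             best_card_value = get_card_value(best_card, True)
--             card_value = get_card_value(card, True)
--
--             if card_value > best_card_value:
--                 best_card = card
--
--         if count > card_count:
--             card_count = count
--             best_card = card
--
--     return best_card
--
-- def get_card_value(card: str, jocker_enabled: bool) -> int:
--     card_values = {
--         "A": 14,
--         "K": 13,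
--         "Q": 12,
--         "J": 1 if jocker_enabled else 11,
--         "T": 10,
--         "9": 9,
--         "8": 8,
--         "7": 7,
--         "6": 6,
--         "5": 5,
--         "4": 4,
--         "3": 3,
--         "2": 2,
--     }
--
--     return card_values[card]
-- ===== SOURCE B (Python) =====
-- def get_card_to_add(cards: str) -> str:
--     # Scan the 13 card symbols in decreasing card value (joker 'J' last):
--     # the first symbol reaching the maximal count wins, so the value
--     # tie-break falls out of the scan order with no value lookups at all.
--     best = ''
--     best_count = 0
--     for sym in "AKQT98765432J":
--         n = cards.count(sym)
--         if n > best_count: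
--             best, best_count = sym, n
--     return best
-- ===== Notes on version B (the rewrite author's own statement) =====
-- stated objective: simpler
-- what changed: Instead of building a Counter and scanning its items with an accumulator and an explicit value tie-break, B scans the fixed 13-symbol card alphabet in decreasing card value, counts each symbol with str.count, and keeps the first symbol reaching the maximal count, so the tie-break is the scan order and no value table is needed; Pre_ excludes strings containing characters outside the 13 card symbols, on which A either raises KeyError (when a tie comparison reaches the foreign character) or returns the foreign character, which B's fixed alphabet never considers.
-- outside the precondition, e.g. on get_card_to_add('XX2'): A returns 'X', B returns '2'; on get_card_to_add('*'): A returns '*', B returns ''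
import Mathlib
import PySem

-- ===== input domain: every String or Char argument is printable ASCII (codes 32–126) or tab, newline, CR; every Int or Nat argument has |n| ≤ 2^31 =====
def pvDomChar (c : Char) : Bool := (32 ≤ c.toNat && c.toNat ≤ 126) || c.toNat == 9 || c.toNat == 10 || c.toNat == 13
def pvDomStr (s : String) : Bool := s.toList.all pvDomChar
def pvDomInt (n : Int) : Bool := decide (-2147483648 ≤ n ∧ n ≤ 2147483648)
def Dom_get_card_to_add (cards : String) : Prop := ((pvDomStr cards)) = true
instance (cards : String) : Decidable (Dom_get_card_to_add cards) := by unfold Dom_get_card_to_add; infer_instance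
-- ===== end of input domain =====

-- B drops A's Counter and value-table tie-break: it scans the fixed 13-symbol card
-- alphabet in decreasing card value and keeps the first symbol reaching the maximal
-- count (objective: simpler).

-- ===== PORT A =====
-- helper get_card_value: the dict lookup card_values[card]; `none` = Python's KeyError
def get_card_value (card : String) (jocker_enabled : Bool) : Option Int :=
  (PySem.Dict.ofList [("A", (14:Int)), ("K", 13), ("Q", 12),
    ("J", if jocker_enabled then 1 else 11), ("T", 10), ("9", 9), ("8", 8),
    ("7", 7), ("6", 6), ("5", 5), ("4", 4), ("3", 3), ("2", 2)]).get? card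

-- the for-loop over Counter(cards).items() with state (best_card, card_count);
-- `none` propagates a KeyError raised inside the tie branch (excluded by Pre_)
def getCardToAddLoop : List (Char × Int) → String → Int → Option String
  | [], best_card, _ => some best_card
  | (c, count) :: rest, best_card, card_count =>
    let card := String.mk [c]
    if count = card_count then
      match get_card_value best_card true, get_card_value card true with
      | some best_card_value, some card_value =>
        let best_card' := if card_value > best_card_value then card else best_card
        if count > card_count then getCardToAddLoop rest card count
        else getCardToAddLoop rest best_card' card_count
      | _, _ => none
    else
      if count > card_count then getCardToAddLoop rest card count
      else getCardToAddLoop rest best_card card_count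

def get_card_to_add (cards : String) : String :=
  -- Counter(cards) iterates chars (1-char strings, here Char) in first-occurrence order
  ((getCardToAddLoop (PySem.Dict.counter cards.toList).items "" 0).getD "")
  -- `.getD ""` is only reached where the Python raises KeyError (outside Pre_)

-- ===== PORT B =====
-- `for sym in "AKQT98765432J": n = cards.count(sym); if n > best_count: best, best_count = sym, n`
def get_card_to_add_alt (cards : String) : String :=
  (("AKQT98765432J".toList).foldl
    (fun (st : String × Int) sym =>
      let n : Int := (PySem.Str.count cards (String.mk [sym]) : Int)
      if n > st.2 then (String.mk [sym], n) else st)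
    ("", 0)).1

-- ===== PRECONDITION & SPEC =====
def pvCardChars : List Char := ['A', 'K', 'Q', 'J', 'T', '9', '8', '7', '6', '5', '4', '3', '2']

-- Pre_ restricts to strings over the 13 card symbols: on any other character A raises
-- KeyError as soon as a tie comparison involves it, or returns the foreign character,
-- which B's fixed 13-symbol alphabet never considers.
def Pre_get_card_to_add (cards : String) : Prop := (cards.toList.all (fun c => pvCardChars.contains c)) = true
instance (cards : String) : Decidable (Pre_get_card_to_add cards) := by
  unfold Pre_get_card_to_add; infer_instance

def pvWitness_get_card_to_add : String := "KTJJT"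

def Spec_get_card_to_add (cards : String) (out : String) : Prop := out = get_card_to_add_alt cards
instance (cards : String) (out : String) : Decidable (Spec_get_card_to_add cards out) := by unfold Spec_get_card_to_add; infer_instance

-- ===== CLAIM (what is proved, stated in full; the proofs are below) =====
def Claim_equal_get_card_to_add : Prop := ∀ (cards : String), Dom_get_card_to_add cards → Pre_get_card_to_add cards → Spec_get_card_to_add cards (get_card_to_add cards)

-- ===== LEMMAS AND PROOFS =====

-- the card value as a total function (proof-side only)
def pvVal (c : Char) : Int := (get_card_value (String.mk [c]) true).getD 0

-- the count of a character, as Python's int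
def pvCnt (cards : String) (c : Char) : Int := (cards.toList.count c : Int)

-- "x's (count, value) key is at most y's": the order both programs maximise
def pvKeyLe (x y : Char × Int) : Prop := x.2 < y.2 ∨ (x.2 = y.2 ∧ pvVal x.1 ≤ pvVal y.1)

-- the pure step of A's loop (once the lookups are known to succeed)
def pvStep (m x : Char × Int) : Char × Int :=
  if m.2 < x.2 ∨ (¬ x.2 < m.2 ∧ pvVal m.1 < pvVal x.1) then x else m

-- the step of B's loop
def pvBStep (cards : String) (st : String × Int) (sym : Char) : String × Int :=
  if (pvCnt cards sym) > st.2 then (String.mk [sym], pvCnt cards sym) else st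

lemma pvKeyLe_trans {x y z : Char × Int} (h1 : pvKeyLe x y) (h2 : pvKeyLe y z) : pvKeyLe x z := by
  unfold pvKeyLe at *
  rcases h1 with h1 | ⟨h1, h1'⟩ <;> rcases h2 with h2 | ⟨h2, h2'⟩
  · exact Or.inl (by omega)
  · exact Or.inl (by omega)
  · exact Or.inl (by omega)
  · exact Or.inr ⟨by omega, le_trans h1' h2'⟩

lemma pv_lookup (c : Char) (h : c ∈ pvCardChars) :
    get_card_value (String.mk [c]) true = some (pvVal c) := by
  fin_cases h <;> decide

-- Chars.count of a single-character needle is List.count (fuel-indexed unfolding of count.go)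
lemma pv_go_count (c : Char) : ∀ (s : List Char) (fuel acc : Nat), s.length ≤ fuel →
    PySem.Chars.count.go [c] fuel s acc = acc + s.count c := by
  intro s
  induction s with
  | nil => intro fuel acc _; cases fuel <;> simp [PySem.Chars.count.go]
  | cons h t ih =>
    intro fuel acc hle
    cases fuel with
    | zero => simp at hle
    | succ f =>
      rw [PySem.Chars.count.go]
      simp only [List.length_cons] at hle
      by_cases hc : c = h
      · subst hc
        simp only [List.isPrefixOf, Bool.and_true, beq_self_eq_true, if_pos,
          List.length_cons, List.drop_succ_cons, List.length_nil, List.drop_zero]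
        rw [ih f (acc+1) (by omega)]
        simp
        omega
      · have hp : [c].isPrefixOf (h :: t) = false := by
          simp [List.isPrefixOf]; exact fun he => hc he
        rw [hp]
        simp only [Bool.false_eq_true, if_false]
        rw [ih f acc (by omega)]
        have hcount : (h :: t).count c = t.count c := by
          rw [List.count_cons]
          simp
          exact fun he => absurd he.symm hc
        omega

lemma pv_count_single (cards : String) (c : Char) :
    (PySem.Str.count cards (String.mk [c]) : Int) = pvCnt cards c := by
  have h1 : PySem.Str.count cards (String.mk [c]) = PySem.Chars.count cards.toList [c] := by
    simp only [PySem.Str.count_eq]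
    rw [show (String.mk [c]).toList = [c] from Eq.symm (String.ofList_eq.mp rfl)]
  rw [h1]
  simp only [PySem.Chars.count, List.isEmpty_cons, Bool.false_eq_true, ↓reduceIte]
  rw [pv_go_count c cards.toList cards.toList.length 0 le_rfl, Nat.zero_add]
  rfl

-- A's loop, on items whose cards are all valid, is the pvStep fold
lemma pv_loopA (items : List (Char × Int)) :
    ∀ (c : Char) (n : Int), c ∈ pvCardChars → (∀ p ∈ items, p.1 ∈ pvCardChars) →
    getCardToAddLoop items (String.mk [c]) n =
      some (String.mk [(items.foldl pvStep (c, n)).1]) := by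
  induction items with
  | nil => intro c n _ _; rfl
  | cons p rest ih =>
    intro c n hc hall
    obtain ⟨d, m⟩ := p
    have hd : d ∈ pvCardChars := hall (d, m) (List.mem_cons_self ..)
    have hrest : ∀ q ∈ rest, q.1 ∈ pvCardChars := fun q hq => hall q (List.mem_cons_of_mem _ hq)
    simp only [getCardToAddLoop, pv_lookup c hc, pv_lookup d hd, List.foldl_cons]
    by_cases hmn : m = n
    · subst hmn
      rw [if_pos rfl]
      by_cases hv : pvVal c < pvVal d
      · have hstep : pvStep (c, m) (d, m) = (d, m) := by
          simp [pvStep, hv]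
        rw [hstep, if_pos hv, if_neg (lt_irrefl m)]
        exact ih d m hd hrest
      · have hstep : pvStep (c, m) (d, m) = (c, m) := by
          simp only [pvStep]; rw [if_neg]
          rintro (h | ⟨_, h⟩); exact lt_irrefl m h; exact hv h
        rw [hstep, if_neg hv, if_neg (lt_irrefl m)]
        exact ih c m hc hrest
    · rw [if_neg (fun h => hmn h)]
      by_cases hlt : n < m
      · rw [if_pos hlt]
        have hstep : pvStep (c, n) (d, m) = (d, m) := by simp [pvStep, hlt]
        rw [hstep]
        exact ih d m hd hrest
      · rw [if_neg hlt]
        have hstep : pvStep (c, n) (d, m) = (c, n) := by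
          simp only [pvStep]; rw [if_neg]; rintro (h | ⟨h, _⟩) <;> omega
        rw [hstep]
        exact ih c n hc hrest

-- the pvStep fold returns an element of the list that dominates all of them in the key order
lemma pv_foldA_max : ∀ (l : List (Char × Int)) (a : Char × Int),
    l.foldl pvStep a ∈ a :: l ∧ pvKeyLe a (l.foldl pvStep a) ∧
      ∀ x ∈ l, pvKeyLe x (l.foldl pvStep a) := by
  intro l
  induction l with
  | nil =>
    intro a
    exact ⟨List.mem_cons_self .., Or.inr ⟨rfl, le_refl _⟩, by simp⟩
  | cons x rest ih =>
    intro a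
    obtain ⟨hmem, hle, hall⟩ := ih (pvStep a x)
    have hstep_mem : pvStep a x = a ∨ pvStep a x = x := by
      unfold pvStep; split_ifs <;> [right; left] <;> rfl
    have hax : pvKeyLe a (pvStep a x) := by
      unfold pvStep pvKeyLe; split_ifs with h
      · rcases h with h | ⟨h, h'⟩
        · exact Or.inl h
        · by_cases h2 : a.2 < x.2
          · exact Or.inl h2
          · exact Or.inr ⟨by omega, le_of_lt h'⟩
      · exact Or.inr ⟨rfl, le_refl _⟩
    have hxx : pvKeyLe x (pvStep a x) := by
      unfold pvStep pvKeyLe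
      split_ifs with h
      · exact Or.inr ⟨rfl, le_refl _⟩
      · push_neg at h
        obtain ⟨h1, h2⟩ := h
        by_cases h3 : x.2 < a.2
        · exact Or.inl h3
        · exact Or.inr ⟨by omega, h2 (by omega)⟩
    refine ⟨?_, pvKeyLe_trans hax hle, ?_⟩
    · rw [List.foldl_cons]
      rcases List.mem_cons.1 hmem with hm | hm
      · rw [hm]
        rcases hstep_mem with h | h <;> rw [h]
        · exact List.mem_cons_self ..
        · exact List.mem_cons_of_mem _ (List.mem_cons_self ..)
      · exact List.mem_cons_of_mem _ (List.mem_cons_of_mem _ hm)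
    · intro y hy
      rw [List.foldl_cons]
      rcases List.mem_cons.1 hy with rfl | hy
      · exact pvKeyLe_trans hxx hle
      · exact hall y hy

-- B's fold once a valid best with positive count is installed
lemma pv_foldB_pos (cards : String) : ∀ (l : List Char) (b : Char),
    0 < pvCnt cards b →
    (∀ s ∈ l, pvVal s < pvVal b) →
    l.Pairwise (fun x y => pvVal y < pvVal x) →
    ∃ b', l.foldl (pvBStep cards) (String.mk [b], pvCnt cards b) =
        (String.mk [b'], pvCnt cards b') ∧ (b' = b ∨ b' ∈ l) ∧
      pvKeyLe (b, pvCnt cards b) (b', pvCnt cards b') ∧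
      ∀ s ∈ l, pvKeyLe (s, pvCnt cards s) (b', pvCnt cards b') := by
  intro l
  induction l with
  | nil =>
    intro b hb _ _
    exact ⟨b, rfl, Or.inl rfl, Or.inr ⟨rfl, le_refl _⟩, by simp⟩
  | cons s rest ih =>
    intro b hb hvals hpw
    have hs : pvVal s < pvVal b := hvals s (List.mem_cons_self ..)
    have hpw' : rest.Pairwise (fun x y => pvVal y < pvVal x) := hpw.tail
    rw [List.foldl_cons]
    by_cases hcnt : pvCnt cards s > pvCnt cards b
    · have hstep : pvBStep cards (String.mk [b], pvCnt cards b) s =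
          (String.mk [s], pvCnt cards s) := by simp [pvBStep, hcnt]
      rw [hstep]
      obtain ⟨b', heq, hmem, hle, hall⟩ := ih s (by omega)
        (fun t ht => (List.pairwise_cons.1 hpw).1 t ht) hpw'
      refine ⟨b', heq, ?_, ?_, ?_⟩
      · rcases hmem with rfl | hm
        · exact Or.inr (List.mem_cons_self ..)
        · exact Or.inr (List.mem_cons_of_mem _ hm)
      · exact pvKeyLe_trans (Or.inl hcnt) hle
      · intro t ht
        rcases List.mem_cons.1 ht with rfl | ht
        · exact hle
        · exact hall t ht
    · have hstep : pvBStep cards (String.mk [b], pvCnt cards b) s =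
          (String.mk [b], pvCnt cards b) := by simp [pvBStep, hcnt]
      rw [hstep]
      obtain ⟨b', heq, hmem, hle, hall⟩ := ih b hb
        (fun t ht => hvals t (List.mem_cons_of_mem _ ht)) hpw'
      refine ⟨b', heq, ?_, hle, ?_⟩
      · rcases hmem with rfl | hm
        · exact Or.inl rfl
        · exact Or.inr (List.mem_cons_of_mem _ hm)
      · intro t ht
        rcases List.mem_cons.1 ht with rfl | ht
        · refine pvKeyLe_trans ?_ hle
          unfold pvKeyLe
          by_cases h2 : pvCnt cards t < pvCnt cards b
          · exact Or.inl h2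
          · exact Or.inr ⟨by omega, le_of_lt hs⟩
        · exact hall t ht
  
-- B's fold from the initial ('', 0) state
lemma pv_foldB_start (cards : String) : ∀ (l : List Char),
    l.Pairwise (fun x y => pvVal y < pvVal x) →
    (l.foldl (pvBStep cards) ("", 0) = ("", 0) ∧ ∀ s ∈ l, pvCnt cards s ≤ 0) ∨
    ∃ b', l.foldl (pvBStep cards) ("", 0) = (String.mk [b'], pvCnt cards b') ∧
      b' ∈ l ∧ 0 < pvCnt cards b' ∧
      ∀ s ∈ l, pvKeyLe (s, pvCnt cards s) (b', pvCnt cards b') := by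
  intro l
  induction l with
  | nil => intro _; exact Or.inl ⟨rfl, by simp⟩
  | cons s rest ih =>
    intro hpw
    rw [List.foldl_cons]
    by_cases hcnt : pvCnt cards s > 0
    · have hstep : pvBStep cards ("", 0) s = (String.mk [s], pvCnt cards s) := by
        simp [pvBStep, hcnt]
      rw [hstep]
      obtain ⟨b', heq, hmem, hle, hall⟩ := pv_foldB_pos cards rest s hcnt
        (fun t ht => (List.pairwise_cons.1 hpw).1 t ht) hpw.tail
      refine Or.inr ⟨b', heq, ?_, ?_, ?_⟩
      · rcases hmem with rfl | hm
        · exact List.mem_cons_self ..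
        · exact List.mem_cons_of_mem _ hm
      · rcases hle with h | ⟨h, _⟩ <;> omega
      · intro t ht
        rcases List.mem_cons.1 ht with rfl | ht
        · exact hle
        · exact hall t ht
    · have hstep : pvBStep cards ("", 0) s = ("", 0) := by simp [pvBStep, hcnt]
      rw [hstep]
      rcases ih hpw.tail with ⟨heq, hall⟩ | ⟨b', heq, hmem, hpos, hall⟩
      · refine Or.inl ⟨heq, ?_⟩
        intro t ht
        rcases List.mem_cons.1 ht with rfl | ht
        · omega
        · exact hall t ht
      · refine Or.inr ⟨b', heq, List.mem_cons_of_mem _ hmem, hpos, ?_⟩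
        intro t ht
        rcases List.mem_cons.1 ht with rfl | ht
        · exact Or.inl (by omega)
        · exact hall t ht

-- the alphabet B scans, as a literal list: the card symbols in decreasing value
set_option maxRecDepth 4096 in
lemma pv_alpha_list :
    "AKQT98765432J".toList = ['A','K','Q','T','9','8','7','6','5','4','3','2','J'] := by decide

lemma pv_mem_alpha (c : Char) (h : c ∈ pvCardChars) : c ∈ "AKQT98765432J".toList := by
  rw [pv_alpha_list]; fin_cases h <;> decide

lemma pv_alphabet_desc :
    ("AKQT98765432J".toList).Pairwise (fun x y => pvVal y < pvVal x) := by
  rw [pv_alpha_list]; decide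

-- pvVal is injective on the card symbols
lemma pv_val_inj : ∀ c ∈ pvCardChars, ∀ d ∈ pvCardChars, pvVal c = pvVal d → c = d := by
  intro c hc
  fin_cases hc <;> (intro d hd; fin_cases hd <;> decide)

-- ===== VERDICT (by name: the statement is the Claim_ definition above) =====
set_option maxRecDepth 4096 in
theorem get_card_to_add_spec : Claim_equal_get_card_to_add := by
  intro cards _ hpreb
  have hpre : ∀ c ∈ cards.toList, c ∈ pvCardChars := by
    intro c hc
    simpa using List.all_eq_true.1 hpreb c hc
  unfold Spec_get_card_to_add get_card_to_add get_card_to_add_alt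
  simp only [pv_count_single]
  by_cases hnil : cards.toList = []
  · have he : cards = "" := by simp_all [String.toList_eq_nil_iff]
    subst he
    decide
  · rw [PySem.Dict.items_counter]
    obtain ⟨k0, s, hs⟩ : ∃ k0 s, PySem.Set.ofList cards.toList = k0 :: s := by
      cases h : PySem.Set.ofList cards.toList with
      | nil =>
        exfalso
        obtain ⟨c, hc⟩ := List.exists_mem_of_ne_nil _ hnil
        have := (PySem.Set.mem_ofList cards.toList c).2 hc
        rw [h] at this
        simp at this
      | cons a b => exact ⟨a, b, rfl⟩
    have hmemL : ∀ k ∈ k0 :: s, k ∈ cards.toList := by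
      intro k hk
      exact (PySem.Set.mem_ofList cards.toList k).1 (hs ▸ hk)
    have hmemall : ∀ k ∈ k0 :: s, k ∈ pvCardChars := fun k hk => hpre k (hmemL k hk)
    have hk0 : k0 ∈ pvCardChars := hmemall k0 (List.mem_cons_self ..)
    have hcount0 : (0 : Int) < pvCnt cards k0 := by
      have : k0 ∈ cards.toList := hmemL k0 (List.mem_cons_self ..)
      have := List.count_pos_iff.2 this
      unfold pvCnt; exact_mod_cast this
    rw [hs]
    -- A side: the first iteration takes (k0, count k0) since its count is positive
    simp only [List.map_cons, getCardToAddLoop]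
    rw [if_neg (by unfold pvCnt at hcount0; omega), if_pos (by unfold pvCnt at hcount0; exact_mod_cast hcount0)]
    have hallrest : ∀ p ∈ s.map (fun k => (k, (cards.toList.count k : Int))),
        p.1 ∈ pvCardChars := by
      intro p hp
      obtain ⟨k, hk, rfl⟩ := List.mem_map.1 hp
      exact hmemall k (List.mem_cons_of_mem _ hk)
    rw [pv_loopA _ k0 _ hk0 hallrest]
    -- A's result is some (c, pvCnt c), c valid, dominating all distinct cards
    set itemsRest := s.map (fun k => (k, (cards.toList.count k : Int))) with hitems
    obtain ⟨hmemA, hleA, hallA⟩ := pv_foldA_max itemsRest (k0, (cards.toList.count k0 : Int))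
    set mA := itemsRest.foldl pvStep (k0, (cards.toList.count k0 : Int)) with hmA
    have hmA_form : ∃ c, c ∈ k0 :: s ∧ mA = (c, pvCnt cards c) := by
      rcases List.mem_cons.1 hmemA with h | h
      · exact ⟨k0, List.mem_cons_self .., h⟩
      · obtain ⟨k, hk, hkeq⟩ := List.mem_map.1 h
        exact ⟨k, List.mem_cons_of_mem _ hk, hkeq.symm⟩
    obtain ⟨c, hcmem, hceq⟩ := hmA_form
    -- B side
    have hB := pv_foldB_start cards ("AKQT98765432J".toList) pv_alphabet_desc
    have hfold_eq : ("AKQT98765432J".toList).foldl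
        (fun (st : String × Int) sym =>
          if pvCnt cards sym > st.2 then (String.mk [sym], pvCnt cards sym) else st) ("", 0) =
        ("AKQT98765432J".toList).foldl (pvBStep cards) ("", 0) := by
      rfl
    rcases hB with ⟨heqB, hallB0⟩ | ⟨b', heqB, hmemB, hposB, hallB⟩
    · exfalso
      have := hallB0 k0 (pv_mem_alpha k0 hk0)
      omega
    · -- both sides pick the unique (count, value)-maximal card
      have hbL : b' ∈ cards.toList := by
        have : 0 < cards.toList.count b' := by unfold pvCnt at hposB; exact_mod_cast hposB
        exact List.count_pos_iff.1 this
      have hbpv : b' ∈ pvCardChars := hpre b' hbL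
      -- keyle (b', cnt b') mA : b' is one of the distinct cards A scanned
      have hbitems : (b', pvCnt cards b') ∈ (k0, (cards.toList.count k0 : Int)) :: itemsRest := by
        have : b' ∈ k0 :: s := by
          rw [← hs]
          exact (PySem.Set.mem_ofList cards.toList b').2 hbL
        rcases List.mem_cons.1 this with rfl | h
        · exact List.mem_cons_self ..
        · exact List.mem_cons_of_mem _ (List.mem_map.2 ⟨b', h, rfl⟩)
      have h1 : pvKeyLe (b', pvCnt cards b') mA := by
        rcases List.mem_cons.1 hbitems with h | h
        · rw [show ((b' : Char), pvCnt cards b') = (k0, (cards.toList.count k0 : Int)) from h]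
          exact hleA
        · exact hallA _ h
      have h2 : pvKeyLe (c, pvCnt cards c) (b', pvCnt cards b') :=
        hallB c (pv_mem_alpha c (hmemall c hcmem))
      rw [hceq] at h1
      have hcb : c = b' := by
        apply pv_val_inj c (hmemall c hcmem) b' hbpv
        unfold pvKeyLe at h1 h2
        dsimp only at h1 h2
        rcases h1 with h1 | ⟨h1, h1'⟩ <;> rcases h2 with h2 | ⟨h2, h2'⟩ <;> omega
      rw [hfold_eq, heqB, hceq, hcb]
      rfl
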